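-- pv_equiv track=rewrite | github.com/programjames/battlecode23 | bytecode_scripts/dijkstra.py | queue_add
-- ===== SOURCE A (Python) =====
-- def parent(n):
--     return (n - 1) // 2
--
-- def add_nest(n):
--     if n == 0:
--         return "queue0 = n;"
--     return f"""if(costs[queue{parent(n)}] > cost) {{
--         queue{n} = queue{parent(n)};
--         {add_nest(parent(n))}
--     }} else {{
--         queue{n} = n;
--     }}"""
--
-- def queue_add(num):
--     s = f"""public static void addToQueue(int n) {{
--     int cost = costs[n];
--     switch(queueHead) {{"""
--     for n in range(num):
--         s += f"""\ncase {n}: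
--     {add_nest(n)}
--     break;"""
--     s += f"""\ndefault:
--     {add_nest(num - 1)}
--     break;"""
--     s += f"}}queueHead++;}}"
--     return s
-- ===== SOURCE B (Python) =====
-- def queue_add(num):
--     # Memoize the nested-insert snippet for each slot in a dict, filling it
--     # bottom-up so each snippet is built once from its parent's snippet.
--     nest = {0: "queue0 = n;"}
--     for n in range(1, num):
--         p = (n - 1) // 2
--         nest[n] = f"""if(costs[queue{p}] > cost) {{
--         queue{n} = queue{p};
--         {nest[p]}
--     }} else {{
--         queue{n} = n;
--     }}"""
--     parts = ["""public static void addToQueue(int n) {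
--     int cost = costs[n];
--     switch(queueHead) {"""]
--     for n in range(num):
--         parts.append(f"""\ncase {n}:
--     {nest[n]}
--     break;""")
--     parts.append(f"""\ndefault:
--     {nest[num - 1]}
--     break;""")
--     parts.append("}queueHead++;}")
--     return "".join(parts)
-- ===== Notes on version B (the rewrite author's own statement) =====
-- stated objective: faster
-- what changed: B fills a dict of nest snippets bottom-up, building each slot's snippet once from its memoized parent snippet, instead of A's recursive add_nest that re-derives the whole parent chain for every case (and re-concatenates strings on each call).
-- outside the precondition, e.g. on queue_add(0): A raises RecursionError, B raises KeyError
import Mathlib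
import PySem

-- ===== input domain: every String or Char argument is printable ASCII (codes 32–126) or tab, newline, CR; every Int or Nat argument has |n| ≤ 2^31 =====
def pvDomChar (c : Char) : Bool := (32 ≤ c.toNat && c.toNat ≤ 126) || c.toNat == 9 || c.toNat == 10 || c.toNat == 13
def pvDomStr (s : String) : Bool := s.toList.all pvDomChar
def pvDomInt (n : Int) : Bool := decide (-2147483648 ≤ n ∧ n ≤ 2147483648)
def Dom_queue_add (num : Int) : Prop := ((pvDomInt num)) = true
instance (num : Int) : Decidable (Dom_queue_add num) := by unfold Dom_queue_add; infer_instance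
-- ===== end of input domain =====

-- B memoizes the per-slot nest snippet in a dict filled bottom-up (each snippet built once from
-- its parent's) instead of A's repeated recursive re-derivation of every parent chain.

-- ===== PORT A =====
def pvParent (n : Int) : Int := PySem.Int.floordiv (n - 1) 2

-- fuel only makes the recursion total; Python's add_nest terminates for n ≥ 0 and the fuel
-- supplied below (n.toNat + 1) always suffices there (outside Pre_ the Python recurses forever).
def pvAddNest (fuel : Nat) (n : Int) : String :=
  match fuel with
  | 0 => ""
  | f + 1 =>
    if n = 0 then "queue0 = n;"
    else "if(costs[queue" ++ PySem.Int.toStr (pvParent n) ++ "] > cost) {\n        queue"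
      ++ PySem.Int.toStr n ++ " = queue" ++ PySem.Int.toStr (pvParent n) ++ ";\n        "
      ++ pvAddNest f (pvParent n) ++ "\n    } else {\n        queue"
      ++ PySem.Int.toStr n ++ " = n;\n    }"

def queue_add (num : Int) : String :=
  ((PySem.List.pyRange 0 num 1).foldl (fun s n =>
      s ++ ("\ncase " ++ PySem.Int.toStr n ++ ":\n    " ++ pvAddNest (n.toNat + 1) n ++ "\n    break;"))
    "public static void addToQueue(int n) {\n    int cost = costs[n];\n    switch(queueHead) {")
  ++ ("\ndefault:\n    " ++ pvAddNest ((num - 1).toNat + 1) (num - 1) ++ "\n    break;")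
  ++ "}queueHead++;}"

-- ===== PORT B =====
def pvNestStep (d : PySem.Dict Int String) (n : Int) : PySem.Dict Int String :=
  d.insert n ("if(costs[queue" ++ PySem.Int.toStr (PySem.Int.floordiv (n - 1) 2) ++ "] > cost) {\n        queue"
      ++ PySem.Int.toStr n ++ " = queue" ++ PySem.Int.toStr (PySem.Int.floordiv (n - 1) 2) ++ ";\n        "
      ++ d.getD (PySem.Int.floordiv (n - 1) 2) "" ++ "\n    } else {\n        queue"
      ++ PySem.Int.toStr n ++ " = n;\n    }")

def pvNestDict (num : Int) : PySem.Dict Int String :=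
  (PySem.List.pyRange 1 num 1).foldl pvNestStep (PySem.Dict.empty.insert 0 "queue0 = n;")

def queue_add_alt (num : Int) : String :=
  PySem.Str.join ""
    (((PySem.List.pyRange 0 num 1).foldl (fun ps n =>
        ps ++ ["\ncase " ++ PySem.Int.toStr n ++ ":\n    " ++ (pvNestDict num).getD n "" ++ "\n    break;"])
      ["public static void addToQueue(int n) {\n    int cost = costs[n];\n    switch(queueHead) {"])
    ++ ["\ndefault:\n    " ++ (pvNestDict num).getD (num - 1) "" ++ "\n    break;"]
    ++ ["}queueHead++;}"])

-- ===== PRECONDITION & SPEC =====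
-- Pre_ excludes num ≤ 0, where A's add_nest(num - 1) recurses forever (RecursionError);
-- B raises KeyError there too.
def Pre_queue_add (num : Int) : Prop := 1 ≤ num
instance (num : Int) : Decidable (Pre_queue_add num) := by unfold Pre_queue_add; infer_instance
def pvWitness_queue_add : Int := 3

def Spec_queue_add (num : Int) (out : String) : Prop := out = queue_add_alt num
instance (num : Int) (out : String) : Decidable (Spec_queue_add num out) := by unfold Spec_queue_add; infer_instance

-- ===== CLAIM (what is proved, stated in full; the proofs are below) =====
def Claim_equal_queue_add : Prop := ∀ (num : Int), Dom_queue_add num → Pre_queue_add num → Spec_queue_add num (queue_add num)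

-- ===== LEMMAS AND PROOFS =====

-- the canonical nest snippet for slot k (proof-only reference function)
def nestStr : Nat → String
  | 0 => "queue0 = n;"
  | (m + 1) =>
    "if(costs[queue" ++ PySem.Int.toStr ((m / 2 : Nat) : Int) ++ "] > cost) {\n        queue"
      ++ PySem.Int.toStr ((m + 1 : Nat) : Int) ++ " = queue" ++ PySem.Int.toStr ((m / 2 : Nat) : Int) ++ ";\n        "
      ++ nestStr (m / 2) ++ "\n    } else {\n        queue"
      ++ PySem.Int.toStr ((m + 1 : Nat) : Int) ++ " = n;\n    }"
  decreasing_by omega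

theorem pvParent_natCast (m : Nat) : pvParent ((m + 1 : Nat) : Int) = ((m / 2 : Nat) : Int) := by
  unfold pvParent
  have : ((m + 1 : Nat) : Int) - 1 = (m : Nat) := by push_cast; ring
  rw [this]
  exact_mod_cast PySem.Int.floordiv_natCast m 2

theorem pvAddNest_eq_nestStr (k : Nat) : ∀ (fuel : Nat), k < fuel → pvAddNest fuel (k : Int) = nestStr k := by
  induction k using Nat.strong_induction_on with
  | _ k ih =>
    intro fuel hf
    match fuel, hf with
    | f + 1, hf =>
      match k with
      | 0 => simp [pvAddNest, nestStr]
      | m + 1 =>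
        have hne : ((m + 1 : Nat) : Int) ≠ 0 := by exact_mod_cast Nat.succ_ne_zero m
        rw [pvAddNest, if_neg hne, pvParent_natCast, nestStr,
          ih (m / 2) (by omega) f (by omega)]

theorem pvNestDict_getD (M : Nat) (hM : 1 ≤ M) :
    ∀ (k : Nat), k < M → (pvNestDict (M : Int)).getD (k : Int) "" = nestStr k := by
  induction M with
  | zero => omega
  | succ M ihM =>
    intro k hk
    by_cases hM1 : M = 0
    · subst hM1
      interval_cases k
      unfold pvNestDict
      rw [PySem.List.pyRange_one_eq_nil (by norm_num)]
      simp [PySem.Dict.getD_insert_self, nestStr]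
    · have h1M : 1 ≤ M := by omega
      have hcast : ((M + 1 : Nat) : Int) = (M : Int) + 1 := by push_cast; ring
      have hrange : PySem.List.pyRange 1 ((M + 1 : Nat) : Int) 1
          = PySem.List.pyRange 1 (M : Int) 1 ++ [(M : Int)] := by
        rw [hcast, PySem.List.pyRange_one_succ_right (by exact_mod_cast h1M)]
      have hfold : pvNestDict ((M + 1 : Nat) : Int) = pvNestStep (pvNestDict (M : Int)) (M : Int) := by
        unfold pvNestDict
        rw [hrange, List.foldl_append]
        rfl
      rw [hfold]
      unfold pvNestStep
      rcases Nat.lt_or_ge k M with hkM | hkM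
      · rw [PySem.Dict.getD_insert, if_neg (by exact_mod_cast Nat.ne_of_lt hkM)]
        exact ihM h1M k hkM
      · have hk : k = M := by omega
        subst hk
        rw [PySem.Dict.getD_insert, if_pos rfl]
        obtain ⟨m, rfl⟩ : ∃ m, k = m + 1 := ⟨k - 1, by omega⟩
        have hp : ((m + 1 : Nat) : Int) - 1 = ((m : Nat) : Int) := by push_cast; ring
        have hfd : PySem.Int.floordiv (((m + 1 : Nat) : Int) - 1) 2 = ((m / 2 : Nat) : Int) := by
          rw [hp]; exact_mod_cast PySem.Int.floordiv_natCast m 2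
        rw [hfd, ihM h1M (m / 2) (by omega), nestStr]

theorem join0_nil : PySem.Str.join "" [] = "" := by
  simp [PySem.Str.join, PySem.Chars.join_nil]

theorem join0_cons (a : String) (xs : List String) :
    PySem.Str.join "" (a :: xs) = a ++ PySem.Str.join "" xs := by
  cases xs with
  | nil => simp [PySem.Str.join, PySem.Chars.join_singleton]
  | cons b t => simp [PySem.Str.join, PySem.Chars.join_cons_cons]

theorem join0_append (xs ys : List String) :
    PySem.Str.join "" (xs ++ ys) = PySem.Str.join "" xs ++ PySem.Str.join "" ys := by
  induction xs with
  | nil => simp [join0_nil]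
  | cons a t ih => simp [join0_cons, ih, String.append_assoc]

theorem foldl_str_append {α : Type} (l : List α) (f : α → String) (s : String) :
    l.foldl (fun s x => s ++ f x) s = s ++ PySem.Str.join "" (l.map f) := by
  induction l generalizing s with
  | nil => simp [join0_nil]
  | cons a t ih => simp [ih, join0_cons, String.append_assoc]

-- ===== VERDICT (by name: the statement is the Claim_ definition above) =====
theorem queue_add_spec : Claim_equal_queue_add := by
  intro num _hDom hPre
  unfold Pre_queue_add at hPre
  unfold Spec_queue_add queue_add queue_add_alt
  obtain ⟨N, rfl⟩ : ∃ N : Nat, num = (N : Int) := ⟨num.toNat, by omega⟩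
  have hN : 1 ≤ N := by exact_mod_cast hPre
  -- the per-case string is the same on both sides
  have hmap : (PySem.List.pyRange 0 (N : Int) 1).map
        (fun n => "\ncase " ++ PySem.Int.toStr n ++ ":\n    " ++ pvAddNest (n.toNat + 1) n ++ "\n    break;")
      = (PySem.List.pyRange 0 (N : Int) 1).map
        (fun n => "\ncase " ++ PySem.Int.toStr n ++ ":\n    " ++ (pvNestDict (N : Int)).getD n "" ++ "\n    break;") := by
    apply List.map_congr_left
    intro n hn
    rw [PySem.List.mem_pyRange_one] at hn
    obtain ⟨k, rfl⟩ : ∃ k : Nat, n = (k : Int) := ⟨n.toNat, by omega⟩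
    have hkN : k < N := by exact_mod_cast hn.2
    rw [Int.toNat_natCast, pvAddNest_eq_nestStr k (k + 1) (by omega),
      pvNestDict_getD N hN k hkN]
  -- the default snippet is the same on both sides
  have hdef : pvAddNest (((N : Int) - 1).toNat + 1) ((N : Int) - 1) = (pvNestDict (N : Int)).getD ((N : Int) - 1) "" := by
    have h1 : ((N : Int) - 1) = ((N - 1 : Nat) : Int) := by push_cast [hN]; ring
    rw [h1, Int.toNat_natCast, pvAddNest_eq_nestStr (N - 1) (N - 1 + 1) (by omega),
      pvNestDict_getD N hN (N - 1) (by omega)]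
  -- flatten both sides
  rw [foldl_str_append]
  rw [show (fun (ps : List String) n =>
      ps ++ ["\ncase " ++ PySem.Int.toStr n ++ ":\n    " ++ (pvNestDict (N : Int)).getD n "" ++ "\n    break;"])
    = (fun ps n => ps ++ [(fun n => "\ncase " ++ PySem.Int.toStr n ++ ":\n    " ++ (pvNestDict (N : Int)).getD n "" ++ "\n    break;") n]) from rfl,
    PySem.List.foldl_append_singleton_eq_map]
  rw [hmap, hdef]
  simp [join0_append, join0_cons, join0_nil, String.append_assoc]
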